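-- pv_equiv track=rewrite | github.com/lolo-231/repo | python/incendio_bosques.py | propagacion
-- ===== SOURCE A (Python) =====
-- def propagacion(bosque):
--     i=0
--     while i<(len(bosque)-1):
--         if bosque[i]==-1:
--             if bosque[i+1]==1:
--                 bosque[i+1]=-1
--             else:
--                 i=i+1
--         else:i=i+1
--     while i>0:
--         if bosque[i]==-1:
--             if bosque[i-1]==1:
--                 bosque[i-1]=-1
--             else:
--                 i=i-1
--         else:i=i-1
--     return bosque
-- ===== SOURCE B (Python) =====
-- def propagacion(bosque):
--     n = len(bosque)
--     i = 0
--     while i < n: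
--         if bosque[i] != 1 and bosque[i] != -1:
--             i += 1
--             continue
--         j = i
--         quemado = False
--         while j < n and (bosque[j] == 1 or bosque[j] == -1):
--             if bosque[j] == -1:
--                 quemado = True
--             j += 1
--         if quemado:
--             for k in range(i, j):
--                 bosque[k] = -1
--         i = j
--     return bosque
-- ===== Notes on version B (the rewrite author's own statement) =====
-- stated objective: simpler
-- what changed: Replaces A's two directional sweeps (a rightward pass spreading fire forward, then a leftward pass spreading it back) by a single left-to-right scan that groups each maximal run of 1/-1 cells and fills the whole run with -1 iff it contains a -1.
import Mathlib
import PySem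

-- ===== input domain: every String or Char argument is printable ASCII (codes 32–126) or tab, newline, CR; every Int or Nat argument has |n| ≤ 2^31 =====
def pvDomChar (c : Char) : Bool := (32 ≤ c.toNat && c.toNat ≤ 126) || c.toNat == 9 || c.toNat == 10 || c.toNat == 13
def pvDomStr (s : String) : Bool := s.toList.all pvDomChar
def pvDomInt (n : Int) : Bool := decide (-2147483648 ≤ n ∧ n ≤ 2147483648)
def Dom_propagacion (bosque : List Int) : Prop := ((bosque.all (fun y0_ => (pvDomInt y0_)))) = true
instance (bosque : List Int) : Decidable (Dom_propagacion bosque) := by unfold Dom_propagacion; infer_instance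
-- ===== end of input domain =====

-- B replaces A's two directional fire-spreading sweeps by one scan over maximal 1/-1 runs
-- (objective: simpler).  Both Pythons mutate `bosque` in place identically and return it;
-- the equivalence proved here is about the returned list value.

-- ===== PORT A =====
-- Helper lemma cited by the termination proofs of loop1/loop2: setting a cell that
-- holds 1 to -1 lowers the number of 1s.
theorem pvCountSet (b : List Int) (k : Nat) (hk : k < b.length)
    (h1 : b.getD k 0 = 1) : (b.set k (-1)).count 1 + 1 = b.count 1 := by
  induction b generalizing k with
  | nil => simp at hk
  | cons x xs ih =>
    cases k with
    | zero =>
      simp [List.getD] at h1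
      simp [h1]
    | succ k =>
      simp [List.getD] at h1
      simp at hk
      have := ih k hk (by simpa [List.getD] using h1)
      simp [List.count_cons]
      omega

-- first Python while-loop: rightward spread; loop state = (bosque, i)
def loop1 (b : List Int) (i : Nat) : List Int × Nat :=
  if h : i < b.length - 1 then
    if h2 : b.getD i 0 = -1 then
      if h3 : b.getD (i+1) 0 = 1 then
        loop1 (b.set (i+1) (-1)) i
      else loop1 b (i+1)
    else loop1 b (i+1)
  else (b, i)
termination_by (b.count 1, b.length - 1 - i)
decreasing_by
  · exact Prod.Lex.left _ _ (by have hc := pvCountSet b (i+1) (by omega) h3; omega)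
  · exact Prod.Lex.right _ (by omega)
  · exact Prod.Lex.right _ (by omega)

-- second Python while-loop: leftward spread
def loop2 (b : List Int) (i : Nat) : List Int × Nat :=
  if h : 0 < i then
    if h2 : b.getD i 0 = -1 then
      if h3 : b.getD (i-1) 0 = 1 then
        loop2 (b.set (i-1) (-1)) i
      else loop2 b (i-1)
    else loop2 b (i-1)
  else (b, i)
termination_by (b.count 1, i)
decreasing_by
  · refine Prod.Lex.left _ _ ?_
    have hk : i - 1 < b.length := by
      by_contra hk
      rw [List.getD_eq_getElem?_getD, List.getElem?_eq_none (by omega)] at h3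
      simp at h3
    have hc := pvCountSet b (i-1) hk h3
    omega
  · exact Prod.Lex.right _ (by omega)
  · exact Prod.Lex.right _ (by omega)

-- all Python list indexing in A is in range (0 ≤ i < len), ported as getD _ 0
def propagacion (bosque : List Int) : List Int :=
  let r1 := loop1 bosque 0
  (loop2 r1.1 r1.2).1

-- ===== PORT B =====
def pB (y : Int) : Bool := y == 1 || y == -1

-- B: single scan; each maximal run of 1/-1 cells is filled with -1 iff it contains a -1
def propagacion_alt (bosque : List Int) : List Int :=
  match bosque with
  | [] => []
  | x :: xs =>
    if pB x then
      let run := List.takeWhile pB (x :: xs)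
      let rest := List.dropWhile pB (x :: xs)
      (if (-1 : Int) ∈ run then List.replicate run.length (-1) else run) ++ propagacion_alt rest
    else x :: propagacion_alt xs
termination_by bosque.length
decreasing_by
  · have : List.dropWhile pB (x :: xs) = List.dropWhile pB xs := by
      simp [List.dropWhile, *]
    rw [this]
    have := List.length_dropWhile_le pB xs
    simp; omega
  · simp

-- ===== PRECONDITION & SPEC =====
def Spec_propagacion (bosque : List Int) (out : List Int) : Prop := out = propagacion_alt bosque
instance (bosque : List Int) (out : List Int) : Decidable (Spec_propagacion bosque out) := by unfold Spec_propagacion; infer_instance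

-- ===== CLAIM (what is proved, stated in full; the proofs are below) =====
def Claim_equal_propagacion : Prop := ∀ (bosque : List Int), Dom_propagacion bosque → Spec_propagacion bosque (propagacion bosque)

-- ===== LEMMAS AND PROOFS =====

-- pure pairwise form of A's first loop body
def gA : List Int → List Int
  | [] => []
  | [x] => [x]
  | x :: y :: t => x :: gA ((if x = -1 ∧ y = 1 then (-1:Int) else y) :: t)
termination_by l => l.length

-- carry form: prev = value just written at the previous position
def gC (c : Int) : List Int → List Int
  | [] => []
  | x :: xs => (if c = -1 ∧ x = 1 then (-1:Int) else x) :: gC (if c = -1 ∧ x = 1 then (-1:Int) else x) xs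

theorem gC_length (c : Int) (l : List Int) : (gC c l).length = l.length := by
  induction l generalizing c with
  | nil => simp [gC]
  | cons x xs ih => simp [gC, ih]

theorem gA_eq_gC : ∀ (l : List Int) (c : Int), c ≠ -1 → gA l = gC c l
  | [], _, _ => by simp [gA, gC]
  | [x], c, hc => by simp [gA, gC, hc]
  | x :: y :: t, c, hc => by
    have ih := gA_eq_gC ((if x = -1 ∧ y = 1 then (-1:Int) else y) :: t) 0 (by norm_num)
    rw [gA, ih]
    simp only [gC]
    rw [if_neg (show ¬((0:Int) = -1 ∧ (if x = -1 ∧ y = 1 then (-1:Int) else y) = 1) by norm_num),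
        if_neg (show ¬(c = -1 ∧ x = 1) by simp [hc])]
termination_by l => l.length

theorem gA_short (l : List Int) (h : l.length ≤ 1) : gA l = l := by
  match l with
  | [] => simp [gA]
  | [x] => simp [gA]
  | x :: y :: t => simp at h

theorem gA_cons_ne (x : Int) (l : List Int) (hx : x ≠ -1) : gA (x :: l) = x :: gA l := by
  match l with
  | [] => simp [gA]
  | y :: t => rw [gA, if_neg (by simp [hx])]

theorem gA_cons_cons_ne (x y : Int) (t : List Int) (h : ¬(x = -1 ∧ y = 1)) :
    gA (x :: y :: t) = x :: gA (y :: t) := by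
  rw [gA, if_neg h]

theorem gA_length (l : List Int) : (gA l).length = l.length := by
  rw [gA_eq_gC l 0 (by norm_num)]; exact gC_length 0 l

theorem take_set_of_le (l : List Int) (i k : Nat) (v : Int) (h : i ≤ k) :
    (l.set k v).take i = l.take i := by
  apply List.ext_getElem
  · simp
  · intro n h1 h2
    simp only [List.getElem_take]
    rw [List.getElem_set_ne (by simp at h1; omega)]

theorem loop1_eq (b : List Int) (i : Nat) :
    loop1 b i = (b.take i ++ gA (b.drop i), max i (b.length - 1)) := by
  fun_induction loop1 b i with
  | case1 b i h h2 h3 ih =>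
    rw [ih]
    have hi1 : i + 1 < b.length := by omega
    have hx : b[i] = -1 := by rw [List.getD_eq_getElem _ _ (by omega)] at h2; exact h2
    have hy : b[i+1] = 1 := by rw [List.getD_eq_getElem _ _ hi1] at h3; exact h3
    have hd : b.drop i = -1 :: 1 :: b.drop (i+2) := by
      rw [List.drop_eq_getElem_cons (show i < b.length by omega),
          List.drop_eq_getElem_cons hi1, hx, hy]
    have hd' : (b.set (i+1) (-1)).drop i = -1 :: -1 :: b.drop (i+2) := by
      rw [show i + 1 = i + 1 by rfl, ← List.set_drop, hd]
      rfl
    have hlen : (b.set (i+1) (-1)).length = b.length := by simp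
    rw [take_set_of_le _ _ _ _ (by omega), hd, hd', hlen, gA, gA]
    norm_num
  | case2 b i h h2 h3 ih =>
    rw [ih]
    have hi1 : i + 1 < b.length := by omega
    have hx : b[i] = -1 := by rw [List.getD_eq_getElem _ _ (by omega)] at h2; exact h2
    have hy : b[i+1] ≠ 1 := by rw [List.getD_eq_getElem _ _ hi1] at h3; exact h3
    have hd : b.drop i = b[i] :: b.drop (i+1) := List.drop_eq_getElem_cons (by omega)
    have hd1 : b.drop (i+1) = b[i+1] :: b.drop (i+2) := List.drop_eq_getElem_cons hi1
    have hp : gA (b.drop i) = b[i] :: gA (b.drop (i+1)) := by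
      rw [hd, hd1, gA_cons_cons_ne _ _ _ (by simp [hy]), ← hd1]
    rw [hp]
    simp only [Prod.mk.injEq]
    constructor
    · have ht : List.take (i+1) b = List.take i b ++ [b[i]] := by
        rw [List.take_add_one, List.getElem?_eq_getElem (show i < b.length by omega)]
        simp
      rw [ht, List.append_assoc]
      rfl
    · omega
  | case3 b i h h2 ih =>
    rw [ih]
    have hd : b.drop i = b[i] :: b.drop (i+1) := List.drop_eq_getElem_cons (by omega)
    have hx : b[i] ≠ -1 := by rw [List.getD_eq_getElem _ _ (by omega)] at h2; exact h2
    have hp : gA (b.drop i) = b[i] :: gA (b.drop (i+1)) := by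
      rw [hd, gA_cons_ne _ _ hx]
    rw [hp]
    simp only [Prod.mk.injEq]
    constructor
    · have ht : List.take (i+1) b = List.take i b ++ [b[i]] := by
        rw [List.take_add_one, List.getElem?_eq_getElem (show i < b.length by omega)]
        simp
      rw [ht, List.append_assoc]
      rfl
    · omega
  | case4 b i h =>
    have : gA (b.drop i) = b.drop i := gA_short _ (by simp; omega)
    rw [this, List.take_append_drop]
    simp
    omega

theorem drop_set_of_lt (l : List Int) (k i : Nat) (v : Int) (h : k < i) :
    (l.set k v).drop i = l.drop i := by
  apply List.ext_getElem
  · simp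
  · intro n h1 h2
    simp only [List.getElem_drop]
    rw [List.getElem_set_ne (by omega)]

theorem set_take_of_lt (l : List Int) (k i : Nat) (v : Int) (h : k < i) :
    (l.set k v).take i = (l.take i).set k v := by
  apply List.ext_getElem
  · simp
  · intro n h1 h2
    by_cases hk : k = n
    · subst hk
      simp at h1
      simp [List.getElem_take, h1]
    · simp [List.getElem_take, hk]

theorem take_concat_getElem (b : List Int) (i : Nat) (hi : i < b.length) :
    b.take (i+1) = b.take i ++ [b[i]] := by
  rw [List.take_add_one, List.getElem?_eq_getElem hi]
  simp

theorem loop2_eq (b : List Int) (i : Nat) :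
    i < b.length → loop2 b i = ((gA (b.take (i+1)).reverse).reverse ++ b.drop (i+1), 0) := by
  fun_induction loop2 b i with
  | case1 b i h h2 h3 ih =>
    intro hi
    have h1i : i - 1 < b.length := by omega
    have hx : b[i] = -1 := by rw [List.getD_eq_getElem _ _ hi] at h2; exact h2
    have hy : b[i-1] = 1 := by rw [List.getD_eq_getElem _ _ h1i] at h3; exact h3
    rw [ih (by simpa using hi)]
    have ht1 : b.take (i+1) = b.take i ++ [b[i]] := take_concat_getElem b i hi
    have ht2 : b.take i = b.take (i-1) ++ [b[i-1]] := by
      conv_lhs => rw [show i = (i-1)+1 by omega]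
      exact take_concat_getElem b (i-1) h1i
    have hd : (b.set (i-1) (-1)).drop (i+1) = b.drop (i+1) := drop_set_of_lt _ _ _ _ (by omega)
    have hsv : (b.take (i+1)).set (i-1) (-1) = b.take (i-1) ++ [-1, b[i]] := by
      rw [ht1, ht2, List.append_assoc, List.set_append]
      have hlt : (b.take (i-1)).length = i-1 := by simp; omega
      rw [if_neg (by rw [hlt]; omega), hlt, Nat.sub_self]
      rfl
    have hrev1 : (b.take (i+1)).reverse = b[i] :: b[i-1] :: (b.take (i-1)).reverse := by
      rw [ht1, ht2]; simp
    have hg : gA (((b.set (i-1) (-1)).take (i+1)).reverse) = gA ((b.take (i+1)).reverse) := by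
      rw [set_take_of_lt _ _ _ _ (by omega), hsv, hrev1]
      have h5 : (b.take (i-1) ++ [-1, b[i]]).reverse = b[i] :: -1 :: (b.take (i-1)).reverse := by
        simp
      rw [h5, hx, hy, gA, gA]
      norm_num
    rw [hg, hd]
  | case2 b i h h2 h3 ih =>
    intro hi
    have h1i : i - 1 < b.length := by omega
    have hx : b[i] = -1 := by rw [List.getD_eq_getElem _ _ hi] at h2; exact h2
    have hy : b[i-1] ≠ 1 := by rw [List.getD_eq_getElem _ _ h1i] at h3; exact h3
    have ih' := ih (by omega)
    rw [show i - 1 + 1 = i by omega] at ih'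
    rw [ih']
    have ht1 : b.take (i+1) = b.take i ++ [b[i]] := take_concat_getElem b i hi
    have ht2 : b.take i = b.take (i-1) ++ [b[i-1]] := by
      conv_lhs => rw [show i = (i-1)+1 by omega]
      exact take_concat_getElem b (i-1) h1i
    have hrt : (b.take i).reverse = b[i-1] :: (b.take (i-1)).reverse := by
      rw [ht2]; simp
    have hg : gA ((b.take (i+1)).reverse) = b[i] :: gA ((b.take i).reverse) := by
      have : (b.take (i+1)).reverse = b[i] :: (b.take i).reverse := by rw [ht1]; simp
      rw [this, hrt, gA_cons_cons_ne _ _ _ (by intro hc; exact hy hc.2), ← hrt]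
    rw [hg, List.reverse_cons, List.append_assoc, List.singleton_append,
        ← List.drop_eq_getElem_cons hi]
  | case3 b i h h2 ih =>
    intro hi
    have hx : b[i] ≠ -1 := by rw [List.getD_eq_getElem _ _ hi] at h2; exact h2
    have ih' := ih (by omega)
    rw [show i - 1 + 1 = i by omega] at ih'
    rw [ih']
    have ht1 : b.take (i+1) = b.take i ++ [b[i]] := take_concat_getElem b i hi
    have hg : gA ((b.take (i+1)).reverse) = b[i] :: gA ((b.take i).reverse) := by
      have : (b.take (i+1)).reverse = b[i] :: (b.take i).reverse := by rw [ht1]; simp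
      rw [this, gA_cons_ne _ _ hx]
    rw [hg, List.reverse_cons, List.append_assoc, List.singleton_append,
        ← List.drop_eq_getElem_cons hi]
  | case4 b i h =>
    intro hi
    have hi0 : i = 0 := by omega
    subst hi0
    match b, hi with
    | x :: t, _ => simp [gA]

theorem gC_congr (c c' : Int) (l : List Int) (hc : c ≠ -1) (hc' : c' ≠ -1) :
    gC c l = gC c' l := by
  cases l with
  | nil => rfl
  | cons x xs => simp [gC, hc, hc']

theorem gC_head_ne_one (c c' : Int) (x : Int) (xs : List Int) (hx : x ≠ 1) :
    gC c (x :: xs) = gC c' (x :: xs) := by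
  simp [gC, hx]

theorem gC_append (c : Int) (l₁ l₂ : List Int) :
    gC c (l₁ ++ l₂) = gC c l₁ ++ gC ((gC c l₁).getLastD c) l₂ := by
  induction l₁ generalizing c with
  | nil => simp [gC]
  | cons x xs ih => simp only [List.cons_append, gC, ih, List.getLastD_cons]

theorem gC_snoc_ne_one (c : Int) (l : List Int) (a : Int) (ha : a ≠ 1) :
    gC c (l ++ [a]) = gC c l ++ [a] := by
  rw [gC_append]
  simp [gC, ha]

theorem gC_burn (l : List Int) (hp : ∀ y ∈ l, pB y) :
    gC (-1) l = List.replicate l.length (-1) := by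
  induction l with
  | nil => rfl
  | cons x xs ih =>
    have hx := hp x (by simp)
    have hxs : ∀ y ∈ xs, pB y := fun y hy => hp y (by simp [hy])
    simp [pB] at hx
    rcases hx with hx | hx <;> simp [gC, hx, ih hxs, List.replicate_succ]

theorem gC_ones (c : Int) (n : Nat) (hc : c ≠ -1) :
    gC c (List.replicate n 1) = List.replicate n 1 := by
  induction n generalizing c with
  | zero => rfl
  | succ n ih => simp [List.replicate_succ, gC, hc, ih]

theorem run_no_fire (r : List Int) (hp : ∀ y ∈ r, pB y) (hn : (-1 : Int) ∉ r) :
    r = List.replicate r.length 1 := by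
  induction r with
  | nil => rfl
  | cons x xs ih =>
    have hx := hp x (by simp)
    simp [pB] at hx
    have hx1 : x = 1 := by rcases hx with h | h; exact h; exact absurd (h ▸ List.mem_cons_self ..) hn
    simp [List.replicate_succ, hx1]
    exact ih (fun y hy => hp y (by simp [hy])) (fun h => hn (by simp [h]))

theorem gC_fwd_run (r : List Int) (c : Int) (hp : ∀ y ∈ r, pB y) (hc : c ≠ -1)
    (hm : (-1 : Int) ∈ r) :
    ∃ j k, 0 < k ∧ j + k = r.length ∧
      gC c r = List.replicate j 1 ++ List.replicate k (-1) := by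
  induction r generalizing c with
  | nil => simp at hm
  | cons x xs ih =>
    by_cases hx : x = -1
    · refine ⟨0, xs.length + 1, by omega, by simp, ?_⟩
      subst hx
      simp [gC, hc, gC_burn xs (fun y hy => hp y (by simp [hy])), List.replicate_succ]
    · have hx1 : x = 1 := by
        have := hp x (by simp); simp [pB, hx] at this; exact this
      have hm' : (-1 : Int) ∈ xs := by rcases List.mem_cons.mp hm with h | h; exact absurd h.symm hx; exact h
      obtain ⟨j, k, hk, hjk, he⟩ := ih (c := 1) (fun y hy => hp y (by simp [hy])) (by norm_num) hm'
      refine ⟨j + 1, k, hk, by simp; omega, ?_⟩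
      subst hx1
      simp [gC, hc, he, List.replicate_succ]

theorem run_lemma (r : List Int) (c c' : Int) (hp : ∀ y ∈ r, pB y)
    (hc : c ≠ -1) (hc' : c' ≠ -1) :
    (gC c' (gC c r).reverse).reverse
      = if (-1 : Int) ∈ r then List.replicate r.length (-1) else r := by
  by_cases hm : (-1 : Int) ∈ r
  · obtain ⟨j, k, hk, hjk, he⟩ := gC_fwd_run r c hp hc hm
    rw [he]
    simp only [List.reverse_append, List.reverse_replicate]
    obtain ⟨k', rfl⟩ : ∃ k', k = k' + 1 := ⟨k - 1, by omega⟩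
    have : List.replicate (k' + 1) (-1:Int) ++ List.replicate j 1
        = -1 :: (List.replicate k' (-1) ++ List.replicate j 1) := by
      simp [List.replicate_succ]
    rw [this]
    have hall : ∀ y ∈ List.replicate k' (-1:Int) ++ List.replicate j (1:Int), pB y := by
      intro y hy
      simp at hy
      rcases hy with ⟨_, rfl⟩ | ⟨_, rfl⟩ <;> simp [pB]
    simp [gC, hc', gC_burn _ hall, hm, ← hjk]
    rw [show j + (k' + 1) = (k' + j) + 1 by omega, List.replicate_succ']
  · rw [run_no_fire r hp hm] at *
    rw [gC_ones c _ hc]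
    simp [List.reverse_replicate, gC_ones c' _ hc', hm]

-- the composed double sweep
def pvF (b : List Int) : List Int := (gC 0 (gC 0 b).reverse).reverse

theorem pvF_eq_alt (b : List Int) : pvF b = propagacion_alt b := by
  fun_induction propagacion_alt b with
  | case1 => simp [pvF, gC]
  | case2 x xs hx run rest ih =>
    have hsplit : List.takeWhile pB (x :: xs) ++ List.dropWhile pB (x :: xs) = x :: xs :=
      List.takeWhile_append_dropWhile
    have hpr : ∀ y ∈ List.takeWhile pB (x :: xs), pB y = true :=
      fun y hy => List.mem_takeWhile_imp hy
    have hrest : List.dropWhile pB (x :: xs) = []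
        ∨ ∃ r0 t0, List.dropWhile pB (x :: xs) = r0 :: t0 ∧ r0 ≠ 1 ∧ r0 ≠ -1 := by
      match hr : List.dropWhile pB (x :: xs) with
      | [] => exact Or.inl rfl
      | r0 :: t0 =>
        refine Or.inr ⟨r0, t0, rfl, ?_⟩
        have h9 := List.head?_dropWhile_not pB (x :: xs)
        rw [hr] at h9
        simp only [List.head?_cons] at h9
        simpa [pB] using h9
    have S1 : gC 0 (List.takeWhile pB (x :: xs) ++ List.dropWhile pB (x :: xs))
        = gC 0 (List.takeWhile pB (x :: xs)) ++ gC 0 (List.dropWhile pB (x :: xs)) := by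
      rw [gC_append]
      rcases hrest with hr | ⟨r0, t0, hr, h1, h2⟩
      · rw [hr]; simp [gC]
      · rw [hr, gC_head_ne_one _ 0 _ _ h1]
    have hc2 : (gC 0 (gC 0 (List.dropWhile pB (x :: xs))).reverse).getLastD 0 ≠ -1 := by
      rcases hrest with hr | ⟨r0, t0, hr, h1, h2⟩
      · rw [hr]; norm_num [gC]
      · rw [hr]
        have hgr : gC 0 (r0 :: t0) = r0 :: gC r0 t0 := by
          rw [gC, if_neg (by norm_num)]
        rw [hgr, List.reverse_cons, gC_snoc_ne_one _ _ _ h1, List.getLastD_concat]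
        exact h2
    have hrw : pvF (x :: xs)
        = (gC ((gC 0 (gC 0 (List.dropWhile pB (x :: xs))).reverse).getLastD 0)
             (gC 0 (List.takeWhile pB (x :: xs))).reverse).reverse
          ++ pvF (List.dropWhile pB (x :: xs)) := by
      show (gC 0 (gC 0 (x :: xs)).reverse).reverse = _
      conv_lhs => rw [← hsplit, S1, List.reverse_append, gC_append, List.reverse_append]
      rfl
    rw [hrw, run_lemma _ 0 _ hpr (by norm_num) hc2, ih]
  | case3 x xs hx ih =>
    have hx1 : x ≠ 1 ∧ x ≠ -1 := by simpa [pB] using hx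
    have hA : gC 0 (x :: xs) = x :: gC 0 xs := by
      rw [gC, if_neg (by norm_num)]
      rcases xs with _ | ⟨y, t⟩
      · rfl
      · rw [gC_congr x 0 _ hx1.2 (by norm_num)]
    have hrw : pvF (x :: xs) = x :: pvF xs := by
      unfold pvF
      rw [hA, List.reverse_cons, gC_snoc_ne_one _ _ _ hx1.1, List.reverse_append]
      rfl
    rw [hrw, ih]

theorem propagacion_eq_pvF (b : List Int) : propagacion b = pvF b := by
  unfold propagacion
  rw [loop1_eq]
  simp only [List.take_zero, List.drop_zero, List.nil_append, Nat.zero_max]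
  match b with
  | [] =>
    rw [loop2]
    simp [gA, pvF, gC]
  | x :: t =>
    have hlen : ((x :: t).length - 1) < (gA (x :: t)).length := by
      rw [gA_length]; simp
    rw [loop2_eq _ _ hlen]
    have hlen2 : (x :: t).length - 1 + 1 = (gA (x :: t)).length := by
      rw [gA_length]; simp
    rw [hlen2, List.take_length, List.drop_length, List.append_nil]
    unfold pvF
    rw [gA_eq_gC _ 0 (by norm_num), gA_eq_gC _ 0 (by norm_num)]

-- ===== VERDICT (by name: the statement is the Claim_ definition above) =====
theorem propagacion_spec : Claim_equal_propagacion := by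
  intro b _
  unfold Spec_propagacion
  rw [propagacion_eq_pvF, pvF_eq_alt]
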